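-- pv_equiv track=rewrite | github.com/tdhorrell/BRSD | src/pathfinding/pathfindingtrailold.py | find_nearest_free_cell
-- ===== SOURCE A (Python) =====
-- import heapq
--
-- GRID_SIZE = (3, 3)  # 5x5 grid for A* pathfinding
--
-- def find_nearest_free_cell(goal, grid):
--     queue = [(0, goal)]
--     visited = set([goal])
--
--     while queue:
--         distance, (row, col) = heapq.heappop(queue)
--         if grid[row][col] == 0:
--             return (row, col)
--         for dr, dc in [(-1, 0), (1, 0), (0, -1), (0, 1)]:
--             new_row, new_col = row + dr, col + dc
--             if 0 <= new_row < GRID_SIZE[0] and 0 <= new_col < GRID_SIZE[1] and (new_row, new_col) not in visited: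
--                 visited.add((new_row, new_col))
--                 heapq.heappush(queue, (distance + 1, (new_row, new_col)))
--     return None
-- ===== SOURCE B (Python) =====
-- GRID_SIZE = (3, 3)
--
-- def find_nearest_free_cell(goal, grid):
--     row, col = goal
--     if grid[row][col] == 0:
--         return (row, col)
--     best = None
--     for r in range(GRID_SIZE[0]):
--         for c in range(GRID_SIZE[1]):
--             if grid[r][c] == 0:
--                 key = (abs(r - row) + abs(c - col), r, c)
--                 if best is None or key < best:
--                     best = key
--     if best is None:
--         return None
--     return (best[1], best[2])
-- ===== Notes on version B (the rewrite author's own statement) =====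
-- stated objective: simpler
-- what changed: Replaces the heap-driven BFS frontier expansion with a single flat scan over the 3x3 grid that keeps a running minimum of the key (manhattan distance to goal, row, col), which equals A's pop order, after reproducing A's initial goal-cell check verbatim.
-- outside the precondition, e.g. on find_nearest_free_cell((-1, -1), [[0, 0, 0], [0, 0, 0], [0, 0, 1]]): A returns None, B returns (0, 0); on find_nearest_free_cell((0, 0), [[1, 0]]): A returns (0, 1), B raises IndexError
import Mathlib
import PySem

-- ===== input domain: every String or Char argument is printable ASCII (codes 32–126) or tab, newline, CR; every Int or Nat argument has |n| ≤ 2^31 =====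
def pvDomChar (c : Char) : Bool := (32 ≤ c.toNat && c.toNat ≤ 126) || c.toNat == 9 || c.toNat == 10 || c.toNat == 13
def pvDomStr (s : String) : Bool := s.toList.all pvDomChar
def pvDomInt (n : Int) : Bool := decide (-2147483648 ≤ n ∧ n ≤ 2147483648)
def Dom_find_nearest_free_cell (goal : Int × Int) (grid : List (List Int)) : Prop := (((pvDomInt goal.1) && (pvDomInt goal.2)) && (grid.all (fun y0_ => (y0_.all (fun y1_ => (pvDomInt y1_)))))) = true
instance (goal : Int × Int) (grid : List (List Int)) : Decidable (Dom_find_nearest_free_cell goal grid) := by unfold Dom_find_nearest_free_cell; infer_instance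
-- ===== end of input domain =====

-- B replaces A's heap-driven BFS by one flat scan keeping the running minimum of
-- (manhattan distance, row, col); same return value on Pre_ (objective: simpler).

-- ===== PORT A =====

def pvGRID_SIZE : Int × Int := (3, 3)

-- grid[r][c] (Python chained indexing; none = IndexError)
def pyGet2 (grid : List (List Int)) (r c : Int) : Option Int :=
  (PySem.List.pyGet? grid r).bind (fun row => PySem.List.pyGet? row c)

-- Python '<' on tuples (d, (r, c)) — lexicographic
def tupLt (a b : Int × Int × Int) : Bool :=
  a.1 < b.1 || (a.1 == b.1 && (a.2.1 < b.2.1 || (a.2.1 == b.2.1 && a.2.2 < b.2.2)))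

-- heapq.heappop: remove and return the minimum element (exact: the heap's elements
-- are totally ordered tuples, so the popped value is the list minimum)
def heapPop (q : List (Int × Int × Int)) :
    Option ((Int × Int × Int) × List (Int × Int × Int)) :=
  match q with
  | [] => none
  | x :: xs =>
    let m := xs.foldl (fun m y => if tupLt y m then y else m) x
    some (m, (x :: xs).erase m)

-- body of A's 'for dr, dc in …' loop: bounds + visited check, push
def stepA (d : Int) (rc : Int × Int)
    (st : List (Int × Int × Int) × PySem.Set (Int × Int)) (dir : Int × Int) :
    List (Int × Int × Int) × PySem.Set (Int × Int) :=
  if 0 ≤ rc.1 + dir.1 ∧ rc.1 + dir.1 < pvGRID_SIZE.1 ∧ 0 ≤ rc.2 + dir.2 ∧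
      rc.2 + dir.2 < pvGRID_SIZE.2 ∧
      PySem.Set.contains st.2 (rc.1 + dir.1, rc.2 + dir.2) = false then
    ((d + 1, rc.1 + dir.1, rc.2 + dir.2) :: st.1, PySem.Set.add st.2 (rc.1 + dir.1, rc.2 + dir.2))
  else st

-- A's while loop. Fuel: each iteration pops one element; elements are only pushed
-- together with a fresh visited in-bounds cell (≤ 9 of them), so ≤ 10 pops ever
-- happen and fuel 16 is never exhausted.
def loopA (grid : List (List Int)) : Nat → List (Int × Int × Int) →
    PySem.Set (Int × Int) → Option (Int × Int)
  | 0, _, _ => none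
  | fuel + 1, q, vis =>
    match heapPop q with
    | none => none
    | some ((d, r, c), rest) =>
      match pyGet2 grid r c with
      | none => none   -- grid[row][col] raises IndexError (outside Pre_)
      | some v =>
        if v = 0 then some (r, c)
        else
          let st := [((-1 : Int), (0 : Int)), (1, 0), (0, -1), (0, 1)].foldl
            (stepA d (r, c)) (rest, vis)
          loopA grid fuel st.1 st.2

def find_nearest_free_cell (goal : Int × Int) (grid : List (List Int)) :
    Option (Int × Int) :=
  loopA grid 16 [(0, goal.1, goal.2)] (PySem.Set.ofList [goal])

-- ===== PORT B =====

-- body of B's inner loop: fold the cell (r, c) into the running best key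
def scanCell (goal : Int × Int) (grid : List (List Int))
    (best : Option (Int × Int × Int)) (r c : Int) : Option (Int × Int × Int) :=
  match pyGet2 grid r c with
  | none => best   -- grid[r][c] raises IndexError (outside Pre_)
  | some w =>
    if w = 0 then
      let key : Int × Int × Int := (|r - goal.1| + |c - goal.2|, r, c)
      match best with
      | none => some key
      | some b => if tupLt key b then some key else some b
    else best

def scanRow (goal : Int × Int) (grid : List (List Int))
    (best : Option (Int × Int × Int)) (r : Int) : Option (Int × Int × Int) :=
  (PySem.List.pyRange 0 pvGRID_SIZE.2 1).foldl
    (fun b c => scanCell goal grid b r c) best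

def find_nearest_free_cell_alt (goal : Int × Int) (grid : List (List Int)) :
    Option (Int × Int) :=
  match pyGet2 grid goal.1 goal.2 with
  | none => none   -- grid[row][col] raises IndexError (outside Pre_)
  | some v =>
    if v = 0 then some (goal.1, goal.2)
    else
      match (PySem.List.pyRange 0 pvGRID_SIZE.1 1).foldl
          (fun b r => scanRow goal grid b r) (none : Option (Int × Int × Int)) with
      | none => none
      | some b => some (b.2.1, b.2.2)

-- ===== PRECONDITION & SPEC =====

-- Pre_ excludes (i) goals reached only through Python's negative-index wraparound
-- (other than a single -1 coordinate next to the grid) whose cell is blocked (A's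
-- truncated BFS there is an indexing accident, B scans the whole grid) and (ii) grids
-- not covering the 3x3 GRID_SIZE when the goal cell is blocked (A's BFS then raises
-- IndexError, or returns only by luck before reaching a missing cell, while B's full
-- scan raises).
def Pre_find_nearest_free_cell (goal : Int × Int) (grid : List (List Int)) : Prop :=
  pyGet2 grid goal.1 goal.2 = some 0 ∨
  (0 ≤ goal.1 ∧ goal.1 < 3 ∧ 0 ≤ goal.2 ∧ goal.2 < 3 ∧
    3 ≤ grid.length ∧ ∀ row ∈ grid.take 3, 3 ≤ row.length) ∨
  ((pyGet2 grid goal.1 goal.2).isSome = true ∧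
    3 ≤ grid.length ∧ (∀ row ∈ grid.take 3, 3 ≤ row.length) ∧
    ((goal.1 = -1 ∧ 0 ≤ goal.2 ∧ goal.2 < 3) ∨
     (goal.2 = -1 ∧ 0 ≤ goal.1 ∧ goal.1 < 3)))
instance (goal : Int × Int) (grid : List (List Int)) :
    Decidable (Pre_find_nearest_free_cell goal grid) := by
  unfold Pre_find_nearest_free_cell; infer_instance

def pvWitness_find_nearest_free_cell : (Int × Int) × List (List Int) :=
  ((1, 1), [[1, 1, 1], [1, 1, 1], [1, 0, 1]])

def Spec_find_nearest_free_cell (goal : Int × Int) (grid : List (List Int)) (out : Option (Int × Int)) : Prop := out = find_nearest_free_cell_alt goal grid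
instance (goal : Int × Int) (grid : List (List Int)) (out : Option (Int × Int)) : Decidable (Spec_find_nearest_free_cell goal grid out) := by unfold Spec_find_nearest_free_cell; infer_instance

-- ===== CLAIM (what is proved, stated in full; the proofs are below) =====
def Claim_equal_find_nearest_free_cell : Prop := ∀ (goal : Int × Int) (grid : List (List Int)), Dom_find_nearest_free_cell goal grid → Pre_find_nearest_free_cell goal grid → Spec_find_nearest_free_cell goal grid (find_nearest_free_cell goal grid)

-- ===== LEMMAS AND PROOFS =====

theorem loopA_step (grid : List (List Int)) (fuel : Nat) (q : List (Int × Int × Int))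
    (vis : PySem.Set (Int × Int)) :
    loopA grid (fuel + 1) q vis =
      match heapPop q with
      | none => none
      | some ((d, r, c), rest) =>
        match pyGet2 grid r c with
        | none => none
        | some v =>
          if v = 0 then some (r, c)
          else
            let st := [((-1 : Int), (0 : Int)), (1, 0), (0, -1), (0, 1)].foldl
              (stepA d (r, c)) (rest, vis)
            loopA grid fuel st.1 st.2 := rfl

-- canonical 0/1 grid carrying only the zero-pattern of the 3x3 block
def canonRow (m : Bool × Bool × Bool) : List Int :=
  [if m.1 then 0 else 1, if m.2.1 then 0 else 1, if m.2.2 then 0 else 1]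

def canon (g : (Bool × Bool × Bool) × (Bool × Bool × Bool) × (Bool × Bool × Bool)) :
    List (List Int) := [canonRow g.1, canonRow g.2.1, canonRow g.2.2]

def maskRow (row : List Int) : Bool × Bool × Bool :=
  (row.getD 0 1 == 0, row.getD 1 1 == 0, row.getD 2 1 == 0)

def maskOf (grid : List (List Int)) :
    (Bool × Bool × Bool) × (Bool × Bool × Bool) × (Bool × Bool × Bool) :=
  (maskRow (grid.getD 0 []), maskRow (grid.getD 1 []), maskRow (grid.getD 2 []))

def ZeroAgree (grid grid' : List (List Int)) : Prop :=
  ∀ r c : Int, 0 ≤ r → r < 3 → 0 ≤ c → c < 3 →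
    ∃ v w, pyGet2 grid r c = some v ∧ pyGet2 grid' r c = some w ∧ (v = 0 ↔ w = 0)

-- pyGet? at the concrete indices 0, 1, 2 of a list with at least three elements
theorem pyGet3_0 {α : Type} (a b c : α) (t : List α) :
    PySem.List.pyGet? (a :: b :: c :: t) 0 = some a := by
  have h : (0 : Int) ≤ (t.length : Int) + 1 + 1 := by positivity
  simp [PySem.List.pyGet?, PySem.List.pyIdx?, h]

theorem pyGet3_1 {α : Type} (a b c : α) (t : List α) :
    PySem.List.pyGet? (a :: b :: c :: t) 1 = some b := by
  have h : (0 : Int) ≤ (t.length : Int) + 1 := by positivity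
  simp [PySem.List.pyGet?, PySem.List.pyIdx?, h]

theorem pyGet3_2 {α : Type} (a b c : α) (t : List α) :
    PySem.List.pyGet? (a :: b :: c :: t) 2 = some c := by
  have h : (2 : Int) ≤ (t.length : Int) + 1 + 1 := by omega
  simp [PySem.List.pyGet?, PySem.List.pyIdx?, h]

theorem zeroAgree_canon (grid : List (List Int)) (h3 : 3 ≤ grid.length)
    (hr : ∀ row ∈ grid.take 3, 3 ≤ row.length) :
    ZeroAgree grid (canon (maskOf grid)) := by
  obtain ⟨r0, r1, r2, rest, rfl⟩ : ∃ r0 r1 r2 rest, grid = r0 :: r1 :: r2 :: rest := by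
    rcases grid with _ | ⟨r0, _ | ⟨r1, _ | ⟨r2, rest⟩⟩⟩ <;> simp at h3
    exact ⟨r0, r1, r2, rest, rfl⟩
  have l0 : 3 ≤ r0.length := hr r0 (by simp)
  have l1 : 3 ≤ r1.length := hr r1 (by simp)
  have l2 : 3 ≤ r2.length := hr r2 (by simp)
  obtain ⟨a0, a1, a2, t0, rfl⟩ : ∃ a b c t, r0 = a :: b :: c :: t := by
    rcases r0 with _ | ⟨a, _ | ⟨b, _ | ⟨c, t⟩⟩⟩ <;> simp at l0
    exact ⟨a, b, c, t, rfl⟩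
  obtain ⟨b0, b1, b2, t1, rfl⟩ : ∃ a b c t, r1 = a :: b :: c :: t := by
    rcases r1 with _ | ⟨a, _ | ⟨b, _ | ⟨c, t⟩⟩⟩ <;> simp at l1
    exact ⟨a, b, c, t, rfl⟩
  obtain ⟨c0, c1, c2, t2, rfl⟩ : ∃ a b c t, r2 = a :: b :: c :: t := by
    rcases r2 with _ | ⟨a, _ | ⟨b, _ | ⟨c, t⟩⟩⟩ <;> simp at l2
    exact ⟨a, b, c, t, rfl⟩
  intro r c hr0 hr1 hc0 hc1
  interval_cases r <;> interval_cases c <;>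
  · simp only [pyGet2, canon, canonRow, maskOf, maskRow, List.getD, pyGet3_0,
      pyGet3_1, pyGet3_2, Option.bind_some, List.getElem?_cons_zero,
      List.getElem?_cons_succ, Option.getD_some]
    refine ⟨_, _, rfl, rfl, ?_⟩
    split <;> rename_i h <;> simp_all

theorem minFold_mem (xs : List (Int × Int × Int)) (x : Int × Int × Int) :
    xs.foldl (fun m y => if tupLt y m then y else m) x ∈ x :: xs := by
  induction xs generalizing x with
  | nil => simp
  | cons y ys ih =>
    simp only [List.foldl]
    rcases List.mem_cons.1 (ih (if tupLt y x then y else x)) with h | h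
    · rw [h]; split
      · simp
      · simp
    · simp [h]

theorem heapPop_mem {q : List (Int × Int × Int)} {m rest}
    (h : heapPop q = some (m, rest)) : m ∈ q ∧ rest = q.erase m := by
  cases q with
  | nil => simp [heapPop] at h
  | cons x xs =>
    simp only [heapPop, Option.some.injEq, Prod.mk.injEq] at h
    obtain ⟨hm, hrest⟩ := h
    subst hm
    exact ⟨minFold_mem xs x, hrest.symm⟩

def InB (x : Int × Int × Int) : Prop :=
  0 ≤ x.2.1 ∧ x.2.1 < 3 ∧ 0 ≤ x.2.2 ∧ x.2.2 < 3

theorem stepA_mem {d rc} {st : List (Int × Int × Int) × PySem.Set (Int × Int)}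
    {dirs : List (Int × Int)} {x} (h : x ∈ (dirs.foldl (stepA d rc) st).1) :
    x ∈ st.1 ∨ InB x := by
  induction dirs generalizing st with
  | nil => exact Or.inl h
  | cons dir ds ih =>
    simp only [List.foldl] at h
    rcases ih h with h' | h'
    · unfold stepA at h'
      split at h'
      · rename_i hc
        rcases List.mem_cons.1 h' with h'' | h''
        · right; subst h''; exact ⟨hc.1, by simpa [pvGRID_SIZE] using hc.2.1,
            hc.2.2.1, by simpa [pvGRID_SIZE] using hc.2.2.2.1⟩
        · exact Or.inl h''
      · exact Or.inl h'
    · exact Or.inr h'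

theorem loopA_congr {grid grid' : List (List Int)} (H : ZeroAgree grid grid') :
    ∀ (fuel : Nat) (q : List (Int × Int × Int)) (vis : PySem.Set (Int × Int)),
      (∀ x ∈ q, InB x) → loopA grid fuel q vis = loopA grid' fuel q vis := by
  intro fuel
  induction fuel with
  | zero => intro q vis _; rfl
  | succ n ih =>
    intro q vis hq
    rw [loopA_step, loopA_step]
    cases hp : heapPop q with
    | none => rfl
    | some p =>
      obtain ⟨⟨d, r, c⟩, rest⟩ := p
      obtain ⟨hmem, hrest⟩ := heapPop_mem hp
      obtain ⟨hb1, hb2, hb3, hb4⟩ := hq _ hmem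
      obtain ⟨v, w, hv, hw, hiff⟩ := H r c hb1 hb2 hb3 hb4
      dsimp only
      simp only [hv, hw]
      by_cases h0 : v = 0
      · rw [if_pos h0, if_pos (hiff.1 h0)]
      · rw [if_neg h0, if_neg (fun hw0 => h0 (hiff.2 hw0))]
        apply ih
        intro x hx
        rcases stepA_mem hx with hx' | hx'
        · exact hq x (List.mem_of_mem_erase (hrest ▸ hx'))
        · exact hx'

theorem find_congr {grid grid' : List (List Int)} (goal : Int × Int)
    (H : ZeroAgree grid grid') (h1 : 0 ≤ goal.1) (h2 : goal.1 < 3)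
    (h3 : 0 ≤ goal.2) (h4 : goal.2 < 3) :
    find_nearest_free_cell goal grid = find_nearest_free_cell goal grid' := by
  unfold find_nearest_free_cell
  exact loopA_congr H 16 _ _ (by intro x hx; simp at hx; subst hx; exact ⟨h1, h2, h3, h4⟩)

theorem scanCell_congr {grid grid' : List (List Int)} (goal : Int × Int)
    (H : ZeroAgree grid grid') {r c : Int} (hb1 : 0 ≤ r) (hb2 : r < 3)
    (hb3 : 0 ≤ c) (hb4 : c < 3) (best : Option (Int × Int × Int)) :
    scanCell goal grid best r c = scanCell goal grid' best r c := by
  obtain ⟨v, w, hv, hw, hiff⟩ := H r c hb1 hb2 hb3 hb4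
  unfold scanCell
  simp only [hv, hw]
  by_cases h0 : v = 0
  · rw [if_pos h0, if_pos (hiff.1 h0)]
  · rw [if_neg h0, if_neg (fun hw0 => h0 (hiff.2 hw0))]

-- B's blocked-goal branch (the flat scan) as a standalone function of the proof
def scanPart (goal : Int × Int) (grid : List (List Int)) : Option (Int × Int) :=
  match (PySem.List.pyRange 0 pvGRID_SIZE.1 1).foldl
      (fun b r => scanRow goal grid b r) (none : Option (Int × Int × Int)) with
  | none => none
  | some b => some (b.2.1, b.2.2)

theorem scanPart_congr {grid grid' : List (List Int)} (goal : Int × Int)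
    (H : ZeroAgree grid grid') :
    scanPart goal grid = scanPart goal grid' := by
  unfold scanPart
  have hrange : PySem.List.pyRange 0 pvGRID_SIZE.1 1 = [0, 1, 2] := by decide
  have hrange2 : PySem.List.pyRange 0 pvGRID_SIZE.2 1 = [0, 1, 2] := by decide
  have hrow : ∀ (r : Int), 0 ≤ r → r < 3 → ∀ best,
      scanRow goal grid best r = scanRow goal grid' best r := by
    intro r hr1 hr2 best
    unfold scanRow
    rw [hrange2]
    simp only [List.foldl]
    rw [scanCell_congr goal H hr1 hr2 (by norm_num) (by norm_num),
        scanCell_congr goal H hr1 hr2 (by norm_num) (by norm_num),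
        scanCell_congr goal H hr1 hr2 (by norm_num) (by norm_num)]
  rw [hrange]
  simp only [List.foldl]
  rw [hrow 0 (by norm_num) (by norm_num), hrow 1 (by norm_num) (by norm_num),
      hrow 2 (by norm_num) (by norm_num)]

theorem alt_nonzero {grid : List (List Int)} (goal : Int × Int) {v : Int}
    (hv : pyGet2 grid goal.1 goal.2 = some v) (h0 : v ≠ 0) :
    find_nearest_free_cell_alt goal grid = scanPart goal grid := by
  unfold find_nearest_free_cell_alt scanPart
  simp only [hv]
  rw [if_neg h0]

theorem alt_congr {grid grid' : List (List Int)} (goal : Int × Int)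
    (H : ZeroAgree grid grid') (h1 : 0 ≤ goal.1) (h2 : goal.1 < 3)
    (h3 : 0 ≤ goal.2) (h4 : goal.2 < 3) :
    find_nearest_free_cell_alt goal grid = find_nearest_free_cell_alt goal grid' := by
  obtain ⟨v, w, hv, hw, hiff⟩ := H goal.1 goal.2 h1 h2 h3 h4
  by_cases h0 : v = 0
  · unfold find_nearest_free_cell_alt
    simp only [hv, hw]
    rw [if_pos h0, if_pos (hiff.1 h0)]
  · rw [alt_nonzero goal hv h0, alt_nonzero goal hw (fun hw0 => h0 (hiff.2 hw0)),
      scanPart_congr goal H]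

theorem eq_of_zero (goal : Int × Int) (grid : List (List Int))
    (h0 : pyGet2 grid goal.1 goal.2 = some 0) :
    find_nearest_free_cell goal grid = find_nearest_free_cell_alt goal grid := by
  unfold find_nearest_free_cell
  rw [show (16 : Nat) = 15 + 1 from rfl, loopA_step]
  simp [heapPop, h0, find_nearest_free_cell_alt]

theorem peel_row (c : Int) (grid : List (List Int)) (hc0 : 0 ≤ c) (hc1 : c < 3)
    {v : Int} (hv : pyGet2 grid (-1) c = some v) (h0 : v ≠ 0) :
    find_nearest_free_cell (-1, c) grid = loopA grid 15 [(1, 0, c)] [(-1, c), (0, c)] := by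
  unfold find_nearest_free_cell
  rw [show (16 : Nat) = 15 + 1 from rfl, loopA_step]
  simp only [heapPop, List.foldl, List.erase, beq_self_eq_true]
  simp only [hv]
  rw [if_neg h0]
  norm_num [stepA, pvGRID_SIZE, PySem.Set.ofList, PySem.Set.add, PySem.Set.contains,
    PySem.Set.empty, List.foldl, hc0, hc1]

theorem peel_col (r : Int) (grid : List (List Int)) (hr0 : 0 ≤ r) (hr1 : r < 3)
    {v : Int} (hv : pyGet2 grid r (-1) = some v) (h0 : v ≠ 0) :
    find_nearest_free_cell (r, -1) grid = loopA grid 15 [(1, r, 0)] [(r, -1), (r, 0)] := by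
  unfold find_nearest_free_cell
  rw [show (16 : Nat) = 15 + 1 from rfl, loopA_step]
  simp only [heapPop, List.foldl, List.erase, beq_self_eq_true]
  simp only [hv]
  rw [if_neg h0]
  norm_num [stepA, pvGRID_SIZE, PySem.Set.ofList, PySem.Set.add, PySem.Set.contains,
    PySem.Set.empty, List.foldl, hr0, hr1]

set_option maxRecDepth 100000 in
set_option maxRecDepth 100000 in
theorem wrapRow_decide : ∀ (c : Fin 3)
    (g : (Bool × Bool × Bool) × (Bool × Bool × Bool) × (Bool × Bool × Bool)),
    loopA (canon g) 15 [(1, 0, (c : Int))] [((-1 : Int), (c : Int)), (0, (c : Int))] =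
      scanPart ((-1 : Int), (c : Int)) (canon g) := by
  decide

set_option maxRecDepth 100000 in
theorem wrapCol_decide : ∀ (r : Fin 3)
    (g : (Bool × Bool × Bool) × (Bool × Bool × Bool) × (Bool × Bool × Bool)),
    loopA (canon g) 15 [(1, (r : Int), 0)] [((r : Int), (-1 : Int)), ((r : Int), 0)] =
      scanPart ((r : Int), (-1 : Int)) (canon g) := by
  decide

set_option maxRecDepth 100000 in
theorem key_decide : ∀ (p : Fin 3 × Fin 3)
    (g : (Bool × Bool × Bool) × (Bool × Bool × Bool) × (Bool × Bool × Bool)),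
    find_nearest_free_cell ((p.1 : Int), (p.2 : Int)) (canon g) =
      find_nearest_free_cell_alt ((p.1 : Int), (p.2 : Int)) (canon g) := by
  decide

-- ===== VERDICT (by name: the statement is the Claim_ definition above) =====
theorem find_nearest_free_cell_spec : Claim_equal_find_nearest_free_cell := by
  intro goal grid _ pre
  unfold Spec_find_nearest_free_cell
  rcases pre with h0 | ⟨h1, h2, h3, h4, h5, h6⟩ | ⟨hs, h5, h6, hwrap⟩
  · exact eq_of_zero goal grid h0
  · have H := zeroAgree_canon grid h5 h6
    have hp1 : ((⟨goal.1.toNat, by omega⟩ : Fin 3) : Int) = goal.1 := by simp; omega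
    have hp2 : ((⟨goal.2.toNat, by omega⟩ : Fin 3) : Int) = goal.2 := by simp; omega
    have key := key_decide (⟨goal.1.toNat, by omega⟩, ⟨goal.2.toNat, by omega⟩) (maskOf grid)
    simp only [hp1, hp2] at key
    calc find_nearest_free_cell goal grid
        = find_nearest_free_cell goal (canon (maskOf grid)) := find_congr goal H h1 h2 h3 h4
      _ = find_nearest_free_cell_alt goal (canon (maskOf grid)) := by
            rw [show goal = (goal.1, goal.2) from rfl]; exact key
      _ = find_nearest_free_cell_alt goal grid :=
            (alt_congr goal H h1 h2 h3 h4).symm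
  · obtain ⟨v, hv⟩ := Option.isSome_iff_exists.1 hs
    by_cases h0 : v = 0
    · exact eq_of_zero goal grid (h0 ▸ hv)
    · have H := zeroAgree_canon grid h5 h6
      obtain ⟨g1, g2⟩ := goal
      dsimp only at hv hwrap
      rcases hwrap with ⟨hg1, hc0, hc1⟩ | ⟨hg2, hr0, hr1⟩
      · subst hg1
        have hp : ((⟨g2.toNat, by omega⟩ : Fin 3) : Int) = g2 := by simp; omega
        have key := wrapRow_decide ⟨g2.toNat, by omega⟩ (maskOf grid)
        rw [hp] at key
        calc find_nearest_free_cell (-1, g2) grid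
            = loopA grid 15 [(1, 0, g2)] [(-1, g2), (0, g2)] :=
              peel_row g2 grid hc0 hc1 hv h0
          _ = loopA (canon (maskOf grid)) 15 [(1, 0, g2)] [(-1, g2), (0, g2)] :=
              loopA_congr H 15 _ _ (by
                intro x hx; simp at hx; subst hx
                exact ⟨by norm_num, by norm_num, hc0, hc1⟩)
          _ = scanPart (-1, g2) (canon (maskOf grid)) := key
          _ = scanPart (-1, g2) grid := (scanPart_congr _ H).symm
          _ = find_nearest_free_cell_alt (-1, g2) grid :=
              (alt_nonzero (-1, g2) hv h0).symm
      · subst hg2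
        have hp : ((⟨g1.toNat, by omega⟩ : Fin 3) : Int) = g1 := by simp; omega
        have key := wrapCol_decide ⟨g1.toNat, by omega⟩ (maskOf grid)
        rw [hp] at key
        calc find_nearest_free_cell (g1, -1) grid
            = loopA grid 15 [(1, g1, 0)] [(g1, -1), (g1, 0)] :=
              peel_col g1 grid hr0 hr1 hv h0
          _ = loopA (canon (maskOf grid)) 15 [(1, g1, 0)] [(g1, -1), (g1, 0)] :=
              loopA_congr H 15 _ _ (by
                intro x hx; simp at hx; subst hx
                exact ⟨hr0, hr1, by norm_num, by norm_num⟩)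
          _ = scanPart (g1, -1) (canon (maskOf grid)) := key
          _ = scanPart (g1, -1) grid := (scanPart_congr _ H).symm
          _ = find_nearest_free_cell_alt (g1, -1) grid :=
              (alt_nonzero (g1, -1) hv h0).symm
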